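-- pv_equiv track=rewrite | github.com/Imraj-Rabbani/BRACU-CSE221 | Lab_4/LabSection22_22301233_CSE221_LabAssignment4_Fall2023/task6.py | dfs
-- ===== SOURCE A (Python) =====
-- def dfs(grid, row, col, visited):
--     if row < 0 or col < 0 or row >= len(grid) or col >= len(grid[0]) or grid[row][col] == '#' or visited[row][col]:
--         return 0
--
--     if grid[row][col] == 'D':
--         visited[row][col] = 1
--         diamonds = 1
--     else:
--         diamonds = 0
--
--     visited[row][col] = 1
--
--     for dr, dc in [(0, 1), (1, 0), (0, -1), (-1, 0)]:#As the edges can form only to the adjacent points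
--         diamonds += dfs(grid, row + dr, col + dc, visited)
--
--     return diamonds
-- ===== SOURCE B (Python) =====
-- def dfs(grid, row, col, visited):
--     # Iterative flood fill with an explicit stack instead of recursion.
--     # Neighbours are pushed in reverse reading order so that pop() visits
--     # them in the same order the recursive version does.
--     stack = [(row, col)]
--     count = 0
--     while stack:
--         r, c = stack.pop()
--         if r < 0 or c < 0 or r >= len(grid) or c >= len(grid[0]) or grid[r][c] == '#' or visited[r][c]:
--             continue
--         visited[r][c] = 1
--         if grid[r][c] == 'D':
--             count += 1
--         for dr, dc in [(-1, 0), (0, -1), (1, 0), (0, 1)]: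
--             stack.append((r + dr, c + dc))
--     return count
-- ===== Notes on version B (the rewrite author's own statement) =====
-- stated objective: idiomatic
-- what changed: The recursive DFS (which mutates visited and risks deep recursion) is replaced by an iterative flood fill over an explicit stack with the guard applied at pop time, accumulating the count in a loop variable instead of summing recursive return values.
-- outside the precondition, e.g. on dfs([['D', '#'], ['#']], 0, 0, [[0, 0], [0]]): A returns 1, B returns 1; on dfs([['D', '.'], ['#']], 0, 0, [[0, 0], [0, 0]]): A raises IndexError, B raises IndexError
import Mathlib
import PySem

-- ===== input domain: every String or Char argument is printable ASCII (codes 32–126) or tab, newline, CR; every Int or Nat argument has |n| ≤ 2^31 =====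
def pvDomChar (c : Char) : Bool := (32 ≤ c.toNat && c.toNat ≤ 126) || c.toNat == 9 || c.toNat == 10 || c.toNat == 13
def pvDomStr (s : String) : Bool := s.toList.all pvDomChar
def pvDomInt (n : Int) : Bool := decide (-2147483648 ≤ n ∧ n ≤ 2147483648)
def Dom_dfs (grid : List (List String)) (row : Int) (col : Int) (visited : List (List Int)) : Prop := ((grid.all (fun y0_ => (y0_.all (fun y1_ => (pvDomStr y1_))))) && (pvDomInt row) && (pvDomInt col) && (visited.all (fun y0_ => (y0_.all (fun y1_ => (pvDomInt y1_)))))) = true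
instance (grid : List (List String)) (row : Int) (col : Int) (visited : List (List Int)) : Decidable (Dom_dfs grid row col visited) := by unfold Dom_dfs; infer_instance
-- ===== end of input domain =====

-- B replaces the recursive DFS by an iterative flood fill over an explicit stack (idiomatic,
-- no recursion depth); equivalence is about the RETURN value — both A and B mutate `visited`
-- in place, marking exactly the same cells.

-- shared primitive helpers (the same grid/visited accesses both Pythons perform)
def pvGGet (grid : List (List String)) (r c : Int) : String :=
  PySem.List.pyGetD (PySem.List.pyGetD grid r []) c ""

def pvVGet (v : List (List Int)) (r c : Int) : Int :=
  PySem.List.pyGetD (PySem.List.pyGetD v r []) c 0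

def pvVSet (v : List (List Int)) (r c : Int) : List (List Int) :=
  PySem.List.pySetD v r (PySem.List.pySetD (PySem.List.pyGetD v r []) c 1)

-- the guard of both programs, in Python's short-circuit order
def pvGuard (grid : List (List String)) (r c : Int) (v : List (List Int)) : Bool :=
  decide (r < 0) || decide (c < 0) || decide ((grid.length : Int) ≤ r) ||
  decide (((grid.headD []).length : Int) ≤ c) ||
  (pvGGet grid r c == "#") || (pvVGet v r c != 0)

-- number of unvisited cells: fuel bound for the recursion / loop (a totality device only)
def pvZeros (v : List (List Int)) : Nat := (v.map (fun row => row.count 0)).sum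

-- ===== PORT A =====
-- literal port of A's recursive DFS; the Int × (List (List Int)) pair threads the
-- in-place mutation of `visited`; fuel pvZeros+1 bounds the recursion depth (each
-- recursive level first marks one unvisited cell)
def stepA (grid : List (List String)) : Nat → Int → Int → List (List Int) → Int × List (List Int)
  | 0, _, _, v => (0, v)
  | f+1, r, c, v =>
    if pvGuard grid r c v then (0, v)
    else
      let d : Int := if pvGGet grid r c == "D" then 1 else 0
      let v0 := if pvGGet grid r c == "D" then pvVSet v r c else v
      let v1 := pvVSet v0 r c
      [((0:Int),(1:Int)), (1,0), (0,-1), (-1,0)].foldl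
        (fun acc p =>
          let s := stepA grid f (r + p.1) (c + p.2) acc.2
          (acc.1 + s.1, s.2)) (d, v1)

def dfs (grid : List (List String)) (row : Int) (col : Int) (visited : List (List Int)) : Int :=
  (stepA grid (pvZeros visited + 1) row col visited).1

-- ===== PORT B =====
-- literal port of B's while-loop over the explicit stack (head = top; the four pushes
-- of Source B leave the stack as (r,c+1)::(r+1,c)::(r,c-1)::(r-1,c)::rest); fuel
-- 4*pvZeros+1 bounds the number of loop iterations (a totality device only)
def stepB (grid : List (List String)) : Nat → List (Int × Int) → List (List Int) → Int → Int
  | 0, _, _, cnt => cnt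
  | _+1, [], _, cnt => cnt
  | f+1, (r, c) :: rest, v, cnt =>
    if pvGuard grid r c v then stepB grid f rest v cnt
    else
      let v' := pvVSet v r c
      let cnt' := if pvGGet grid r c == "D" then cnt + 1 else cnt
      stepB grid f ((r, c+1) :: (r+1, c) :: (r, c-1) :: (r-1, c) :: rest) v' cnt'

def dfs_alt (grid : List (List String)) (row : Int) (col : Int) (visited : List (List Int)) : Int :=
  stepB grid (4 * pvZeros visited + 1) [(row, col)] visited 0

-- ===== PRECONDITION & SPEC =====
-- Python A raises IndexError when the flood fill reaches a grid row shorter than grid[0]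
-- or a visited cell that does not exist; Pre_ admits (a) well-shaped inputs (grid rows and
-- the first grid.length visited rows at least as long as grid[0], visited at least as long
-- as grid) and (b) any input whose start cell is immediately rejected by the guard without
-- an out-of-range access (then A returns 0 whatever the shapes).  This excludes some ragged
-- inputs on which A happens to return because the fill stops early — see claim.json cites.
def Pre_dfs (grid : List (List String)) (row : Int) (col : Int) (visited : List (List Int)) : Prop :=
  ((∀ i < grid.length, (grid.headD []).length ≤ (grid.getD i []).length) ∧
   grid.length ≤ visited.length ∧
   (∀ i < grid.length, (grid.headD []).length ≤ (visited.getD i []).length)) ∨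
  (row < 0 ∨ col < 0 ∨ (grid.length : Int) ≤ row ∨
   (0 ≤ row ∧ row < (grid.length : Int) ∧ 0 ≤ col ∧ ((grid.headD []).length : Int) ≤ col) ∨
   (0 ≤ row ∧ row < (grid.length : Int) ∧ 0 ≤ col ∧ col < (((grid.getD row.toNat []).length : Int)) ∧
     (grid.getD row.toNat []).getD col.toNat "" = "#") ∨
   (0 ≤ row ∧ row < (grid.length : Int) ∧ 0 ≤ col ∧ col < ((grid.headD []).length : Int) ∧
     col < (((grid.getD row.toNat []).length : Int)) ∧
     row < (visited.length : Int) ∧ col < (((visited.getD row.toNat []).length : Int)) ∧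
     (visited.getD row.toNat []).getD col.toNat 0 ≠ 0))

instance (grid : List (List String)) (row : Int) (col : Int) (visited : List (List Int)) : Decidable (Pre_dfs grid row col visited) := by unfold Pre_dfs; infer_instance

def pvWitness_dfs : List (List String) × Int × Int × List (List Int) :=
  ([["D", "."], [".", "#"]], 0, 0, [[0, 0], [0, 0]])

def Spec_dfs (grid : List (List String)) (row : Int) (col : Int) (visited : List (List Int)) (out : Int) : Prop := out = dfs_alt grid row col visited
instance (grid : List (List String)) (row : Int) (col : Int) (visited : List (List Int)) (out : Int) : Decidable (Spec_dfs grid row col visited out) := by unfold Spec_dfs; infer_instance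

-- ===== CLAIM (what is proved, stated in full; the proofs are below) =====
def Claim_equal_dfs : Prop := ∀ (grid : List (List String)) (row : Int) (col : Int) (visited : List (List Int)), Dom_dfs grid row col visited → Pre_dfs grid row col visited → Spec_dfs grid row col visited (dfs grid row col visited)

-- ===== LEMMAS AND PROOFS =====

-- shape invariant maintained by the fill: visited covers the grid rectangle
def pvC (grid : List (List String)) (v : List (List Int)) : Prop :=
  grid.length ≤ v.length ∧ ∀ i < grid.length, (grid.headD []).length ≤ (v.getD i []).length

-- A's recursion applied to a list of cells in order (proof-side only)
def stepL (grid : List (List String)) (f : Nat) : List (Int × Int) → List (List Int) → Int × List (List Int)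
  | [], v => (0, v)
  | p :: rest, v =>
    let s := stepA grid f p.1 p.2 v
    let t := stepL grid f rest s.2
    (s.1 + t.1, t.2)

theorem pvGuard_false (grid : List (List String)) (r c : Int) (v : List (List Int))
    (h : pvGuard grid r c v = false) :
    0 ≤ r ∧ 0 ≤ c ∧ r < (grid.length : Int) ∧ c < ((grid.headD []).length : Int) ∧
      pvVGet v r c = 0 := by
  simp only [pvGuard, Bool.or_eq_false_iff, decide_eq_false_iff_not, not_lt, not_le,
    beq_eq_false_iff_ne, bne_eq_false_iff_eq] at h
  exact ⟨h.1.1.1.1.1, h.1.1.1.1.2, h.1.1.1.2, h.1.1.2, h.2⟩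

theorem pvVGet_nf (v : List (List Int)) (r c : Int) (hr : 0 ≤ r) (hc : 0 ≤ c) :
    pvVGet v r c = (v.getD r.toNat []).getD c.toNat 0 := by
  unfold pvVGet
  rw [PySem.List.pyGetD_of_nonneg _ _ hr, PySem.List.pyGetD_of_nonneg _ _ hc]

theorem pvGGet_nf (grid : List (List String)) (r c : Int) (hr : 0 ≤ r) (hc : 0 ≤ c) :
    pvGGet grid r c = (grid.getD r.toNat []).getD c.toNat "" := by
  unfold pvGGet
  rw [PySem.List.pyGetD_of_nonneg _ _ hr, PySem.List.pyGetD_of_nonneg _ _ hc]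

theorem pvVSet_nf (v : List (List Int)) (r c : Int) (hr : 0 ≤ r) (hc : 0 ≤ c) :
    pvVSet v r c = v.set r.toNat ((v.getD r.toNat []).set c.toNat 1) := by
  unfold pvVSet
  rw [PySem.List.pyGetD_of_nonneg _ _ hr, PySem.List.pySetD_of_nonneg _ _ hr,
    PySem.List.pySetD_of_nonneg _ _ hc]

-- counting zeros in a row after setting one entry to 1
theorem count_set_one_lt (l : List Int) (j : Nat) (hj : j < l.length) (h0 : l.getD j 0 = 0) :
    (l.set j 1).count 0 + 1 = l.count 0 := by
  induction l generalizing j with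
  | nil => simp at hj
  | cons a t ih =>
    cases j with
    | zero =>
      simp [List.getD] at h0
      simp [List.set, h0]
    | succ j =>
      have hj' : j < t.length := by simpa using hj
      have h0' : t.getD j 0 = 0 := by simpa [List.getD] using h0
      have := ih j hj' h0'
      simp only [List.set]
      by_cases ha : a = (0:Int) <;> simp [List.count_cons, ha] <;> omega

theorem zeros_set_lt (v : List (List Int)) (i j : Nat) (hi : i < v.length)
    (hj : j < (v.getD i []).length) (h0 : (v.getD i []).getD j 0 = 0) :
    pvZeros (v.set i ((v.getD i []).set j 1)) + 1 = pvZeros v := by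
  induction v generalizing i with
  | nil => simp at hi
  | cons a t ih =>
    cases i with
    | zero =>
      simp [List.getD] at hj h0 ⊢
      simp [pvZeros]
      have := count_set_one_lt a j hj h0
      omega
    | succ i =>
      simp at hi
      simp [List.getD] at hj h0 ⊢
      have := ih i hi (by simpa [List.getD] using hj) (by simpa [List.getD] using h0)
      simp [pvZeros] at this ⊢
      omega

theorem getD_set_list (v : List (List Int)) (i k : Nat) (x : List Int) :
    (v.set i x).getD k [] = if i = k ∧ i < v.length then x else v.getD k [] := by
  induction v generalizing i k with
  | nil => simp [List.set]
  | cons a t ih =>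
    cases i with
    | zero => cases k <;> simp [List.set, List.getD]
    | succ i =>
      cases k with
      | zero => simp [List.set, List.getD]
      | succ k =>
        have := ih i k
        by_cases h : i = k <;> simp [List.set, List.getD, h] at this ⊢ <;> exact this

-- one guard-passing visit: zeros drop by one, the cover invariant survives,
-- and re-marking the same cell is a no-op
theorem visit_facts (grid : List (List String)) (r c : Int) (v : List (List Int))
    (hC : pvC grid v) (h : pvGuard grid r c v = false) :
    pvZeros (pvVSet v r c) + 1 = pvZeros v ∧ pvC grid (pvVSet v r c) ∧
      pvVSet (pvVSet v r c) r c = pvVSet v r c := by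
  obtain ⟨hr, hc, hrlt, hclt, hv0⟩ := pvGuard_false grid r c v h
  obtain ⟨hlen, hrow⟩ := hC
  have hi : r.toNat < v.length := by omega
  have hig : r.toNat < grid.length := by omega
  have hj : c.toNat < (v.getD r.toNat []).length := by
    have := hrow r.toNat hig; omega
  have h0 : (v.getD r.toNat []).getD c.toNat 0 = 0 := by
    rw [pvVGet_nf v r c hr hc] at hv0; exact hv0
  rw [pvVSet_nf v r c hr hc]
  refine ⟨zeros_set_lt v r.toNat c.toNat hi hj h0, ⟨?_, ?_⟩, ?_⟩
  · simpa using hlen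
  · intro k hk
    rw [getD_set_list]
    split_ifs with hcase
    · simp only [List.length_set]
      have := hrow r.toNat hig
      omega
    · exact hrow k hk
  · rw [pvVSet_nf _ r c hr hc]
    rw [getD_set_list]
    simp [hi, List.set_set]

theorem stepA_succ_false (grid : List (List String)) (f : Nat) (r c : Int)
    (v : List (List Int)) (h : pvGuard grid r c v = false) :
    stepA grid (f+1) r c v =
      ((if pvGGet grid r c == "D" then (1:Int) else 0) +
        (stepL grid f [(r, c+1), (r+1, c), (r, c-1), (r-1, c)]
          (pvVSet (if pvGGet grid r c == "D" then pvVSet v r c else v) r c)).1,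
       (stepL grid f [(r, c+1), (r+1, c), (r, c-1), (r-1, c)]
          (pvVSet (if pvGGet grid r c == "D" then pvVSet v r c else v) r c)).2) := by
  refine Prod.ext ?_ ?_ <;> simp [stepA, h, stepL, List.foldl] <;> ring_nf

theorem v1_eq (grid : List (List String)) (r c : Int) (v : List (List Int))
    (hC : pvC grid v) (h : pvGuard grid r c v = false) :
    pvVSet (if pvGGet grid r c == "D" then pvVSet v r c else v) r c = pvVSet v r c := by
  by_cases hd : pvGGet grid r c == "D"
  · simp only [hd, if_pos]
    exact (visit_facts grid r c v hC h).2.2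
  · simp [hd]

-- monotonicity: the fill never creates zeros and preserves the cover invariant
theorem zc_stepA (grid : List (List String)) :
    ∀ (f : Nat) (r c : Int) (v : List (List Int)), pvC grid v →
      pvZeros (stepA grid f r c v).2 ≤ pvZeros v ∧ pvC grid (stepA grid f r c v).2 := by
  intro f
  induction f with
  | zero => intro r c v hC; simp only [stepA]; exact ⟨le_refl _, hC⟩
  | succ f ih =>
    have ihL : ∀ (l : List (Int × Int)) (v : List (List Int)), pvC grid v →
        pvZeros (stepL grid f l v).2 ≤ pvZeros v ∧ pvC grid (stepL grid f l v).2 := by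
      intro l
      induction l with
      | nil => intro v hC; simp only [stepL]; exact ⟨le_refl _, hC⟩
      | cons p rest ihl =>
        intro v hC
        have h1 := ih p.1 p.2 v hC
        have h2 := ihl (stepA grid f p.1 p.2 v).2 h1.2
        simp only [stepL]
        exact ⟨le_trans h2.1 h1.1, h2.2⟩
    intro r c v hC
    by_cases h : pvGuard grid r c v
    · simp only [stepA, h, if_pos]; exact ⟨le_refl _, hC⟩
    · simp only [Bool.not_eq_true] at h
      rw [stepA_succ_false grid f r c v h]
      rw [v1_eq grid r c v hC h]
      have hv := visit_facts grid r c v hC h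
      have := ihL [(r, c+1), (r+1, c), (r, c-1), (r-1, c)] (pvVSet v r c) hv.2.1
      have ha := this.1
      have hb := hv.1
      dsimp only
      exact ⟨by omega, this.2⟩

theorem zc_stepL (grid : List (List String)) (f : Nat) :
    ∀ (l : List (Int × Int)) (v : List (List Int)), pvC grid v →
      pvZeros (stepL grid f l v).2 ≤ pvZeros v ∧ pvC grid (stepL grid f l v).2 := by
  intro l
  induction l with
  | nil => intro v hC; simp only [stepL]; exact ⟨le_refl _, hC⟩
  | cons p rest ihl =>
    intro v hC
    have h1 := zc_stepA grid f p.1 p.2 v hC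
    have h2 := ihl (stepA grid f p.1 p.2 v).2 h1.2
    simp only [stepL]
    exact ⟨le_trans h2.1 h1.1, h2.2⟩

-- fuel irrelevance: any fuel above the number of unvisited cells computes the same result
theorem irrel_stepA (grid : List (List String)) :
    ∀ (n : Nat) (f g : Nat) (r c : Int) (v : List (List Int)), pvC grid v →
      pvZeros v ≤ n → pvZeros v < f → pvZeros v < g →
      stepA grid f r c v = stepA grid g r c v := by
  intro n
  induction n with
  | zero =>
    intro f g r c v hC hn hf hg
    obtain ⟨f, rfl⟩ : ∃ f', f = f' + 1 := ⟨f - 1, by omega⟩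
    obtain ⟨g, rfl⟩ : ∃ g', g = g' + 1 := ⟨g - 1, by omega⟩
    by_cases h : pvGuard grid r c v
    · simp [stepA, h]
    · simp only [Bool.not_eq_true] at h
      have := (visit_facts grid r c v hC h).1
      omega
  | succ n ih =>
    have ihL : ∀ (f g : Nat) (l : List (Int × Int)) (v : List (List Int)), pvC grid v →
        pvZeros v ≤ n → pvZeros v < f → pvZeros v < g →
        stepL grid f l v = stepL grid g l v := by
      intro f g l
      induction l with
      | nil => intro v _ _ _ _; simp [stepL]
      | cons p rest ihl =>
        intro v hC hn hf hg
        have he := ih f g p.1 p.2 v hC hn hf hg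
        have hz := zc_stepA grid f p.1 p.2 v hC
        simp only [stepL, he]
        rw [ihl (stepA grid g p.1 p.2 v).2 (he ▸ hz.2) (by rw [← he]; omega)
          (by rw [← he]; omega) (by rw [← he]; omega)]
    intro f g r c v hC hn hf hg
    obtain ⟨f, rfl⟩ : ∃ f', f = f' + 1 := ⟨f - 1, by omega⟩
    obtain ⟨g, rfl⟩ : ∃ g', g = g' + 1 := ⟨g - 1, by omega⟩
    by_cases h : pvGuard grid r c v
    · simp [stepA, h]
    · simp only [Bool.not_eq_true] at h
      rw [stepA_succ_false grid f r c v h, stepA_succ_false grid g r c v h]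
      rw [v1_eq grid r c v hC h]
      have hv := visit_facts grid r c v hC h
      rw [ihL f g [(r, c+1), (r+1, c), (r, c-1), (r-1, c)] (pvVSet v r c) hv.2.1
        (by omega) (by omega) (by omega)]

theorem irrel_stepL (grid : List (List String)) (f g : Nat) :
    ∀ (l : List (Int × Int)) (v : List (List Int)), pvC grid v →
      pvZeros v < f → pvZeros v < g →
      stepL grid f l v = stepL grid g l v := by
  intro l
  induction l with
  | nil => intro v _ _ _; simp [stepL]
  | cons p rest ihl =>
    intro v hC hf hg
    have he := irrel_stepA grid (pvZeros v) f g p.1 p.2 v hC (le_refl _) hf hg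
    have hz := zc_stepA grid f p.1 p.2 v hC
    simp only [stepL, he]
    rw [ihl (stepA grid g p.1 p.2 v).2 (he ▸ hz.2) (by rw [← he]; omega) (by rw [← he]; omega)]

theorem stepL_append (grid : List (List String)) (f : Nat) :
    ∀ (l1 l2 : List (Int × Int)) (v : List (List Int)),
      stepL grid f (l1 ++ l2) v =
        ((stepL grid f l1 v).1 + (stepL grid f l2 (stepL grid f l1 v).2).1,
         (stepL grid f l2 (stepL grid f l1 v).2).2) := by
  intro l1
  induction l1 with
  | nil => intro l2 v; simp [stepL]
  | cons p rest ih =>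
    intro l2 v
    simp only [List.cons_append, stepL, ih]
    refine Prod.ext ?_ rfl
    simp; ring

-- the main bridge: the stack loop computes the recursion applied to the stack cells in order
theorem bridge (grid : List (List String)) :
    ∀ (fB : Nat) (stack : List (Int × Int)) (v : List (List Int)) (cnt : Int), pvC grid v →
      4 * pvZeros v + stack.length ≤ fB →
      stepB grid fB stack v cnt = cnt + (stepL grid (pvZeros v + 1) stack v).1 := by
  intro fB
  induction fB with
  | zero =>
    intro stack v cnt hC hf
    have : stack = [] := by
      cases stack with
      | nil => rfl
      | cons a l => simp at hf
    subst this
    simp [stepB, stepL]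
  | succ g ih =>
    intro stack v cnt hC hf
    cases stack with
    | nil => simp [stepB, stepL]
    | cons p rest =>
      obtain ⟨r, c⟩ := p
      by_cases h : pvGuard grid r c v
      · simp only [stepB, h, if_pos]
        rw [ih rest v cnt hC (by simp at hf ⊢; omega)]
        have : stepA grid (pvZeros v + 1) r c v = (0, v) := by simp [stepA, h]
        simp [stepL, this]
      · simp only [Bool.not_eq_true] at h
        have hv := visit_facts grid r c v hC h
        have hz : pvZeros (pvVSet v r c) + 1 = pvZeros v := hv.1
        -- one loop step, then the induction hypothesis on the longer stack
        have lhs : stepB grid (g+1) ((r, c) :: rest) v cnt =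
            stepB grid g ((r, c+1) :: (r+1, c) :: (r, c-1) :: (r-1, c) :: rest) (pvVSet v r c)
              (if pvGGet grid r c == "D" then cnt + 1 else cnt) := by
          simp [stepB, h]
        rw [lhs, ih _ (pvVSet v r c) _ hv.2.1 (by simp at hf ⊢; omega)]
        -- unfold the head of A's recursion with fuel pvZeros v + 1
        have hA : stepA grid (pvZeros v + 1) r c v =
            ((if pvGGet grid r c == "D" then (1:Int) else 0) +
              (stepL grid (pvZeros (pvVSet v r c) + 1)
                [(r, c+1), (r+1, c), (r, c-1), (r-1, c)] (pvVSet v r c)).1,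
             (stepL grid (pvZeros (pvVSet v r c) + 1)
                [(r, c+1), (r+1, c), (r, c-1), (r-1, c)] (pvVSet v r c)).2) := by
          rw [show pvZeros v + 1 = (pvZeros (pvVSet v r c) + 1) + 1 by omega,
            stepA_succ_false grid (pvZeros (pvVSet v r c) + 1) r c v h, v1_eq grid r c v hC h]
        have happ : ((r, c+1) :: (r+1, c) :: (r, c-1) :: (r-1, c) :: rest) =
            [(r, c+1), (r+1, c), (r, c-1), (r-1, c)] ++ rest := rfl
        rw [happ, stepL_append grid (pvZeros (pvVSet v r c) + 1)]
        have hzw := zc_stepL grid (pvZeros (pvVSet v r c) + 1)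
          [(r, c+1), (r+1, c), (r, c-1), (r-1, c)] (pvVSet v r c) hv.2.1
        have hwle := hzw.1
        have rhs : (stepL grid (pvZeros v + 1) ((r, c) :: rest) v).1 =
            (stepA grid (pvZeros v + 1) r c v).1 +
            (stepL grid (pvZeros v + 1) rest (stepA grid (pvZeros v + 1) r c v).2).1 := by
          simp only [stepL]
        rw [rhs, hA]
        have hrest := irrel_stepL grid (pvZeros v + 1) (pvZeros (pvVSet v r c) + 1) rest
          (stepL grid (pvZeros (pvVSet v r c) + 1)
            [(r, c+1), (r+1, c), (r, c-1), (r-1, c)] (pvVSet v r c)).2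
          hzw.2 (by omega) (by omega)
        dsimp only
        rw [hrest]
        by_cases hd : pvGGet grid r c == "D" <;> simp [hd] <;> ring

theorem stepB_nil (grid : List (List String)) (f : Nat) (v : List (List Int)) (cnt : Int) :
    stepB grid f [] v cnt = cnt := by
  cases f <;> simp [stepB]

-- a guarded start: both ports return 0 immediately
theorem guarded_case (grid : List (List String)) (row col : Int) (visited : List (List Int))
    (h : pvGuard grid row col visited = true) :
    dfs grid row col visited = dfs_alt grid row col visited := by
  simp [dfs, dfs_alt, stepA, stepB, h, stepB_nil]

-- ===== VERDICT (by name: the statement is the Claim_ definition above) =====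
theorem dfs_spec : Claim_equal_dfs := by
  intro grid row col visited _ hpre
  unfold Spec_dfs
  rcases hpre with hshape | hstart
  · -- well-shaped case: the bridge lemma
    have hC : pvC grid visited := ⟨hshape.2.1, hshape.2.2⟩
    rw [dfs_alt, bridge grid (4 * pvZeros visited + 1) [(row, col)] visited 0 hC (by simp)]
    simp [stepL, dfs]
  · -- immediately guarded start: both return 0
    have hg : pvGuard grid row col visited = true := by
      simp only [pvGuard, Bool.or_eq_true, decide_eq_true_eq, beq_iff_eq, bne_iff_ne]
      rcases hstart with h | h | h | h | h | h
      · tauto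
      · tauto
      · tauto
      · obtain ⟨-, -, -, h4⟩ := h; tauto
      · obtain ⟨hr, hrl, hc, hcl, hcell⟩ := h
        have hx : pvGGet grid row col = "#" := by
          rw [pvGGet_nf grid row col hr hc]; exact hcell
        tauto
      · obtain ⟨hr, hrl, hc, hcl, -, -, -, hval⟩ := h
        have hx : pvVGet visited row col ≠ 0 := by
          rw [pvVGet_nf visited row col hr hc]; exact hval
        tauto
    exact guarded_case grid row col visited hg
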